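-- pv_equiv track=rewrite | github.com/coldbeeen/cote_study | programmers/비밀 코드 해독_seulbeen.py | solution
-- ===== SOURCE A (Python) =====
-- from itertools import combinations
--
-- def solution(n, q, ans):
--     answer = 0
--     # 1-n 까지 숫자 배열
--     nums = [i for i in range(1, n + 1)]
--
--     # 0을 찾기 위함
--     def rm_idx():
--         result = []
--         for i in range(len(ans)):
--             if ans[i] == 0:
--                 result.append(i)
--         return result
--
--     rm = rm_idx()
--
--     # 하나도 못맞춘 예측에 해당하는 숫자들을 지움
--     for i in rm:
--         for j in q[i]:
--             try:
--                 nums.remove(j)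
--             except:
--                 pass
--
--     for c in combinations(nums, 5):
--         flag = 1
--         for i in range(len(ans)):
--             if ans[i] == 0:
--                 continue
--             cnt = 0
--             for j in q[i]:
--                 if j in c:
--                     cnt += 1
--             if cnt != ans[i]:
--                 flag = 0
--                 break
--         if flag:
--             answer += 1
--
--     return answer
-- ===== SOURCE B (Python) =====
-- from itertools import combinations
--
-- # B: no preprocessing -- enumerate all 5-combinations of 1..n and verify every
-- # constraint (including ans[i] == 0 ones) directly; any candidate containing a
-- # number A would have pruned fails its zero constraint, so the counts agree.
-- def solution(n, q, ans):
--     pairs = list(zip(q, ans))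
--     total = 0
--     for c in combinations(range(1, n + 1), 5):
--         for qi, a in pairs:
--             cnt = 0
--             for j in qi:
--                 cnt += j in c
--             if cnt != a:
--                 break
--         else:
--             total += 1
--     return total
-- ===== Notes on version B (the rewrite author's own statement) =====
-- stated objective: simpler
-- what changed: B drops A's two-phase prune-then-enumerate structure (rm_idx helper, try/except removal of numbers hit by ans[i]==0 queries, then a skip-zero flag loop over range(len(ans))) and instead enumerates 5-combinations of 1..n directly, verifying every query constraint, zero ones included, with one for/else pass over zip(q, ans).
-- outside the precondition, e.g. on solution(0, [], [1]): A returns 0, B returns 0; on solution(6, [[1, 1]], [1, 5]): A returns 0, B returns 0; on solution(6, [[1, 2]], [1, 1]): A raises IndexError, B returns 2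
import Mathlib
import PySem

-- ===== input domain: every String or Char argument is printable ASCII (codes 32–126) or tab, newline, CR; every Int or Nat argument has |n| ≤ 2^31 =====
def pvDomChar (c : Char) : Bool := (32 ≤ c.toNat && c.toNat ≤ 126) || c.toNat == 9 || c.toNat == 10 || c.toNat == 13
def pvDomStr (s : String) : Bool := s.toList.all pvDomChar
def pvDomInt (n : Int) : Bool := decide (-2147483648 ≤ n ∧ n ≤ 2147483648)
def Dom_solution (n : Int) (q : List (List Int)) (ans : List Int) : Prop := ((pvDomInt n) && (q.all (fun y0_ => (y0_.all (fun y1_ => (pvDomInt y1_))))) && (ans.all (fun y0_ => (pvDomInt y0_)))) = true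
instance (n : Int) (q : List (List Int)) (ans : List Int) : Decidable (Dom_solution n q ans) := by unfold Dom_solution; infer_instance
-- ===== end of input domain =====

-- B drops A's prune-then-enumerate two-phase structure and checks every query constraint
-- (zero ones included) on each 5-combination directly; objective: simpler.

-- ===== PORT A =====
-- rm_idx(): indices i with ans[i] == 0
def rmIdxA (ans : List Int) : List Int :=
  (PySem.List.pyRange 0 (ans.length : Int) 1).foldl
    (fun result i => if PySem.List.pyGetD ans i 0 = 0 then result ++ [i] else result) []

-- the nums.remove(j) loop with its try/except pass
def removeNumsA (q : List (List Int)) (rm : List Int) (nums0 : List Int) : List Int :=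
  rm.foldl (fun nums i =>
    (PySem.List.pyGetD q i []).foldl (fun nums j =>
      match PySem.List.remove? nums j with
      | some nums' => nums'
      | none => nums) nums) nums0

-- the flag loop over range(len(ans)) with continue / break
def checkFlagA (q : List (List Int)) (ans : List Int) (c : List Int) : List Int → Int
  | [] => 1
  | i :: rest =>
    if PySem.List.pyGetD ans i 0 = 0 then checkFlagA q ans c rest
    else
      let cnt := (PySem.List.pyGetD q i []).foldl
        (fun cnt j => if c.contains j then cnt + 1 else cnt) (0 : Int)
      if cnt ≠ PySem.List.pyGetD ans i 0 then 0 else checkFlagA q ans c rest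

def solution (n : Int) (q : List (List Int)) (ans : List Int) : Int :=
  let nums := PySem.List.pyRange 1 (n + 1) 1
  let rm := rmIdxA ans
  let nums := removeNumsA q rm nums
  (PySem.List.combinations nums 5).foldl
    (fun answer c =>
      if checkFlagA q ans c (PySem.List.pyRange 0 (ans.length : Int) 1) ≠ 0
      then answer + 1 else answer) 0

-- ===== PORT B =====
-- the for/else verification pass over pairs = list(zip(q, ans)), break = return false
def checkAllB (c : List Int) : List (List Int × Int) → Bool
  | [] => true
  | p :: rest =>
    let cnt := p.1.foldl (fun cnt j => cnt + (if c.contains j then 1 else 0)) (0 : Int)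
    if cnt ≠ p.2 then false else checkAllB c rest

def solution_alt (n : Int) (q : List (List Int)) (ans : List Int) : Int :=
  let pairs := q.zip ans
  (PySem.List.combinations (PySem.List.pyRange 1 (n + 1) 1) 5).foldl
    (fun total c => if checkAllB c pairs then total + 1 else total) 0

-- ===== PRECONDITION & SPEC =====
-- Pre_ admits inputs whose answers do not outnumber the queries, and also those where
-- they do but every out-of-range answer is nonzero and some in-range constraint is
-- plainly unsatisfiable (a negative answer, or one exceeding the query's length), so A
-- never touches an out-of-range index; the remaining ans-longer-than-q inputs are
-- excluded because there A can raise IndexError (e.g. n=6, q=[[1,2]], ans=[1,1]).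
def Pre_solution (_n : Int) (q : List (List Int)) (ans : List Int) : Prop :=
  ans.length ≤ q.length ∨
    ((∀ k : Nat, (hk : k < ans.length) → q.length ≤ k → ans[k] ≠ 0) ∧
     (∃ k : Nat, ∃ hq : k < q.length, ∃ ha : k < ans.length,
        ans[k]'ha < 0 ∨ ((q[k]'hq).length : Int) < ans[k]'ha))
instance (n : Int) (q : List (List Int)) (ans : List Int) : Decidable (Pre_solution n q ans) := by
  unfold Pre_solution; infer_instance

def pvWitness_solution : Int × List (List Int) × List Int := (6, [[1,2,3,4,5], [6]], [4, 0])

def Spec_solution (n : Int) (q : List (List Int)) (ans : List Int) (out : Int) : Prop := out = solution_alt n q ans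
instance (n : Int) (q : List (List Int)) (ans : List Int) (out : Int) : Decidable (Spec_solution n q ans out) := by unfold Spec_solution; infer_instance

-- ===== CLAIM (what is proved, stated in full; the proofs are below) =====
def Claim_equal_solution : Prop := ∀ (n : Int) (q : List (List Int)) (ans : List Int), Dom_solution n q ans → Pre_solution n q ans → Spec_solution n q ans (solution n q ans)

-- ===== LEMMAS AND PROOFS =====

-- step of A's removal loop on a Nodup list is a filter
lemma removeStep_eq_filter (l : List Int) (j : Int) (h : l.Nodup) :
    (match PySem.List.remove? l j with
      | some l' => l'
      | none => l) = l.filter (fun x => x ≠ j) := by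
  by_cases hj : j ∈ l
  · rw [PySem.List.remove?_eq_some_erase _ _ hj, List.Nodup.erase_eq_filter h]
    simp only [bne, ne_eq, decide_not, beq_eq_decide]
  · rw [(PySem.List.remove?_eq_none_iff _ _).mpr hj]
    rw [List.filter_eq_self.mpr]
    intro a ha
    simp only [ne_eq, decide_not]
    simp only [Bool.not_eq_true', decide_eq_false_iff_not]
    rintro rfl; exact hj ha

-- sequentially removing every element of js from a Nodup list filters them all out
lemma foldl_remove_eq_filter (js : List Int) : ∀ (l : List Int), l.Nodup →
    js.foldl (fun nums j =>
      (match PySem.List.remove? nums j with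
        | some nums' => nums'
        | none => nums)) l = l.filter (fun x => !(js.contains x)) := by
  induction js with
  | nil => intro l _; simp
  | cons j js ih =>
    intro l h
    rw [List.foldl_cons, removeStep_eq_filter l j h, ih _ (h.filter _), List.filter_filter]
    apply List.filter_congr
    intro x _
    simp [ne_eq, Bool.and_comm]

-- A's nested removal loop = one removal pass over the concatenation of the pruned queries
lemma removeNumsA_eq_flat (q : List (List Int)) (rm : List Int) (l : List Int) :
    removeNumsA q rm l
      = (rm.flatMap (fun i => PySem.List.pyGetD q i [])).foldl (fun nums j =>
          (match PySem.List.remove? nums j with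
            | some nums' => nums'
            | none => nums)) l := by
  unfold removeNumsA
  induction rm generalizing l with
  | nil => simp
  | cons i rm ih => simp [List.foldl_append, ih]

-- the key counting lemma: pruning the base list with `keep` versus conjoining
-- "all elements keep" onto the per-combination predicate
lemma countP_combinations_filter {α : Type} (keep : α → Bool) :
    ∀ (xs : List α) (r : Nat) (P P' : List α → Bool),
      (∀ c, P' c = (P c && c.all keep)) →
      (PySem.List.combinations xs r).countP P'
        = (PySem.List.combinations (xs.filter keep) r).countP P := by
  intro xs
  induction xs with
  | nil =>
    intro r P P' h
    cases r with
    | zero => simp [PySem.List.combinations_zero, List.countP, List.countP.go, h]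
    | succ r => simp [PySem.List.combinations_nil_succ]
  | cons x xs ih =>
    intro r P P' h
    cases r with
    | zero =>
      simp [PySem.List.combinations_zero, List.countP, List.countP.go, h]
    | succ r =>
      rw [PySem.List.combinations_cons_succ, List.countP_append, List.countP_map]
      by_cases hx : keep x
      · have hfilter : (x :: xs).filter keep = x :: xs.filter keep := by simp [hx]
        rw [hfilter, PySem.List.combinations_cons_succ, List.countP_append, List.countP_map]
        congr 1
        · exact ih r (fun c => P (x :: c)) (fun c => P' (x :: c))
            (by intro c; simp [h, hx])
        · exact ih (r+1) P P' h
      · have hfilter : (x :: xs).filter keep = xs.filter keep := by simp [hx]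
        have hmap : (PySem.List.combinations xs r).countP (P' ∘ (x :: ·)) = 0 := by
          rw [List.countP_eq_zero]
          intro c _
          simp [Function.comp, h, hx]
        rw [hmap, hfilter, Nat.zero_add]
        exact ih (r+1) P P' h

lemma checkFlagA_ne_zero (q : List (List Int)) (ans : List Int) (c : List Int) (idxs : List Int) :
    (checkFlagA q ans c idxs ≠ 0)
      ↔ ∀ i ∈ idxs, PySem.List.pyGetD ans i 0 ≠ 0 →
          ((PySem.List.pyGetD q i []).countP (fun j => decide (j ∈ c)) : Int)
            = PySem.List.pyGetD ans i 0 := by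
  induction idxs with
  | nil => simp [checkFlagA]
  | cons i rest ih =>
    by_cases h : PySem.List.pyGetD ans i 0 = 0
    · simp [checkFlagA, h, ih]
    · rw [checkFlagA]
      simp only [h, if_false, PySem.List.foldl_if_add_one, Int.zero_add, List.contains_eq_mem]
      by_cases hc : ((PySem.List.pyGetD q i []).countP (fun j => decide (j ∈ c)) : Int)
          = PySem.List.pyGetD ans i 0
      · simp [hc, ih, h]
      · simp [hc, h]

lemma rmIdxA_eq (ans : List Int) :
    rmIdxA ans = (PySem.List.pyRange 0 (ans.length : Int) 1).filter
      (fun i => decide (PySem.List.pyGetD ans i 0 = 0)) := by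
  unfold rmIdxA
  rw [show (fun (result : List Int) (i : Int) =>
        if PySem.List.pyGetD ans i 0 = 0 then result ++ [i] else result)
      = (fun (result : List Int) (i : Int) =>
        if (fun i => decide (PySem.List.pyGetD ans i 0 = 0)) i = true
        then result ++ [id i] else result) from by funext r i; simp]
  rw [PySem.List.foldl_append_if]
  simp

-- membership in the flattened pruned-query list
lemma mem_flatJ (q : List (List Int)) (ans : List Int) (hlen : ans.length ≤ q.length) (x : Int) :
    (x ∈ (rmIdxA ans).flatMap (fun i => PySem.List.pyGetD q i []))
      ↔ ∃ k : Nat, ∃ hk : k < ans.length,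
          ans[k] = 0 ∧ x ∈ q[k]'(lt_of_lt_of_le hk hlen) := by
  rw [List.mem_flatMap]
  constructor
  · rintro ⟨i, hi, hx⟩
    rw [rmIdxA_eq, List.mem_filter] at hi
    obtain ⟨hir, hz⟩ := hi
    rw [PySem.List.mem_pyRange_one] at hir
    refine ⟨i.toNat, by omega, ?_, ?_⟩
    · have := PySem.List.pyGetD_eq_getElem ans (i := i) 0 hir.1 (by omega)
      simp only [decide_eq_true_eq] at hz
      rw [this] at hz; exact hz
    · have := PySem.List.pyGetD_eq_getElem q (i := i) [] hir.1 (by omega)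
      rw [this] at hx; exact hx
  · rintro ⟨k, hk, hz, hx⟩
    refine ⟨(k : Int), ?_, ?_⟩
    · rw [rmIdxA_eq, List.mem_filter, PySem.List.mem_pyRange_one]
      refine ⟨⟨by omega, by omega⟩, ?_⟩
      rw [PySem.List.pyGetD_eq_getElem ans (i := (k:Int)) 0 (by omega) (by omega)]
      simp [hz]
    · rw [PySem.List.pyGetD_eq_getElem q (i := (k:Int)) [] (by omega) (by omega)]
      simpa using hx

-- B's break/else pass over the pairs is the conjunction of all per-query count checks
lemma checkAllB_eq_all (c : List Int) (pairs : List (List Int × Int)) :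
    checkAllB c pairs
      = pairs.all (fun p => ((p.1.countP (fun j => decide (j ∈ c)) : Int) == p.2)) := by
  induction pairs with
  | nil => simp [checkAllB]
  | cons p rest ih =>
    rw [checkAllB]
    simp only [List.contains_eq_mem]
    have hcnt : p.1.foldl
          (fun (cnt : Int) (j : Int) => cnt + (if decide (j ∈ c) = true then 1 else 0)) 0
        = ((p.1.countP (fun j => decide (j ∈ c)) : Int)) := by
      rw [show (fun (cnt : Int) (j : Int) => cnt + (if decide (j ∈ c) = true then 1 else 0))
          = (fun (cnt : Int) (j : Int) =>
              if (fun j => decide (j ∈ c)) j = true then cnt + 1 else cnt) from by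
        funext cnt j; split <;> omega]
      rw [PySem.List.foldl_if_add_one, Int.zero_add]
    rw [hcnt]
    by_cases h : ((p.1.countP (fun j => decide (j ∈ c)) : Int)) = p.2
    · simp [h, ih]
    · simp [h]

lemma check_bridge (q : List (List Int)) (ans : List Int) (hlen : ans.length ≤ q.length)
    (c : List Int) :
    checkAllB c (q.zip ans)
      = (decide (checkFlagA q ans c (PySem.List.pyRange 0 (ans.length : Int) 1) ≠ 0)
         && c.all (fun x =>
             !(((rmIdxA ans).flatMap (fun i => PySem.List.pyGetD q i [])).contains x))) := by
  rw [Bool.eq_iff_iff]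
  simp only [Bool.and_eq_true, decide_eq_true_eq, List.all_eq_true, Bool.not_eq_true',
    List.contains_eq_mem, decide_eq_false_iff_not]
  -- rewrite every side into "∀ k < ans.length, …"
  have hB : checkAllB c (q.zip ans) = true
      ↔ ∀ k : Nat, ∀ hk : k < ans.length,
          (((q[k]'(lt_of_lt_of_le hk hlen)).countP (fun j => decide (j ∈ c))) : Int)
            = ans[k] := by
    rw [checkAllB_eq_all, List.all_eq_true]
    rw [List.forall_mem_iff_forall_getElem]
    constructor
    · intro h k hk
      have hk' : k < (q.zip ans).length := by simp; omega
      have := h k hk'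
      simp only [List.getElem_zip, beq_iff_eq] at this
      exact this
    · intro h k hk
      have hk2 : k < ans.length := by simp at hk; omega
      simp only [List.getElem_zip, beq_iff_eq]
      exact h k hk2
  rw [hB]
  have hA := checkFlagA_ne_zero q ans c (PySem.List.pyRange 0 (ans.length : Int) 1)
  rw [hA]
  have hidx : ∀ (Φ : Int → Prop), (∀ i ∈ PySem.List.pyRange 0 (ans.length : Int) 1, Φ i)
      ↔ ∀ k : Nat, k < ans.length → Φ (k : Int) := by
    intro Φ
    constructor
    · intro h k hk; exact h _ (by rw [PySem.List.mem_pyRange_one]; omega)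
    · intro h i hi
      rw [PySem.List.mem_pyRange_one] at hi
      have := h i.toNat (by omega)
      simpa [Int.toNat_of_nonneg hi.1] using this
  rw [hidx]
  -- keep side ↔ zero constraints
  have hK : (∀ x ∈ c, x ∉ (rmIdxA ans).flatMap (fun i => PySem.List.pyGetD q i []))
      ↔ ∀ k : Nat, ∀ hk : k < ans.length, ans[k] = 0 →
          (((q[k]'(lt_of_lt_of_le hk hlen)).countP (fun j => decide (j ∈ c))) : Int) = 0 := by
    constructor
    · intro h k hk hz
      have : ∀ j ∈ q[k]'(lt_of_lt_of_le hk hlen), j ∉ c := by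
        intro j hj hjc
        exact h j hjc ((mem_flatJ q ans hlen j).mpr ⟨k, hk, hz, hj⟩)
      simp only [Int.natCast_eq_zero, List.countP_eq_zero]
      intro j hj
      simp [this j hj]
    · intro h x hx hmem
      obtain ⟨k, hk, hz, hxq⟩ := (mem_flatJ q ans hlen x).mp hmem
      have := h k hk hz
      simp only [Int.natCast_eq_zero, List.countP_eq_zero] at this
      exact absurd (by simpa using hx) (by simpa using this x hxq)
  rw [hK]
  have hgA : ∀ (k : Nat), (hk : k < ans.length) →
      PySem.List.pyGetD ans (k : Int) 0 = ans[k]'hk := by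
    intro k hk
    rw [PySem.List.pyGetD_natCast, List.getD_eq_getElem _ _ hk]
  have hgQ : ∀ (k : Nat), (hk : k < ans.length) →
      PySem.List.pyGetD q (k : Int) [] = q[k]'(lt_of_lt_of_le hk hlen) := by
    intro k hk
    rw [PySem.List.pyGetD_natCast, List.getD_eq_getElem _ _ (lt_of_lt_of_le hk hlen)]
  constructor
  · intro h
    refine ⟨?_, ?_⟩
    · intro k hk hne
      rw [hgA k hk] at hne ⊢
      rw [hgQ k hk]
      exact h k hk
    · intro k hk hz
      rw [h k hk, hz]
  · rintro ⟨h1, h2⟩ k hk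
    by_cases hz : ans[k] = 0
    · rw [h2 k hk hz, hz]
    · have := h1 k hk (by rw [hgA k hk]; exact hz)
      rw [hgA k hk, hgQ k hk] at this
      exact this

theorem solution_spec_aux (n : Int) (q : List (List Int)) (ans : List Int)
    (hlen : ans.length ≤ q.length) : solution n q ans = solution_alt n q ans := by
  simp only [solution, solution_alt]
  rw [removeNumsA_eq_flat,
      foldl_remove_eq_filter _ _ (PySem.List.nodup_pyRange_one 1 (n + 1)),
      PySem.List.foldl_ite_add_one, PySem.List.foldl_if_add_one, Int.zero_add, Int.zero_add]
  congr 1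
  exact (countP_combinations_filter _ (PySem.List.pyRange 1 (n + 1) 1) 5 _ _
    (check_bridge q ans hlen)).symm

-- on an input with an unsatisfiable in-range constraint both programs count nothing
lemma solution_zero_aux (n : Int) (q : List (List Int)) (ans : List Int)
    (h : ∃ k : Nat, ∃ hq : k < q.length, ∃ ha : k < ans.length,
        ans[k]'ha < 0 ∨ ((q[k]'hq).length : Int) < ans[k]'ha) :
    solution n q ans = solution_alt n q ans := by
  obtain ⟨k, hq, ha, hbad⟩ := h
  have hcast : (0:Int) ≤ ((q[k]'hq).length : Int) := by omega
  have hnzA : PySem.List.pyGetD ans (k : Int) 0 = ans[k]'ha := by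
    rw [PySem.List.pyGetD_natCast, List.getD_eq_getElem _ _ ha]
  have hgQ : PySem.List.pyGetD q (k : Int) [] = q[k]'hq := by
    rw [PySem.List.pyGetD_natCast, List.getD_eq_getElem _ _ hq]
  have hA : solution n q ans = 0 := by
    simp only [solution]
    rw [PySem.List.foldl_ite_add_one, Int.zero_add, Int.natCast_eq_zero, List.countP_eq_zero]
    intro c _
    rw [Bool.not_eq_true, decide_eq_false_iff_not, Decidable.not_not]
    by_contra hne
    have hcon := (checkFlagA_ne_zero q ans c _).mp hne (k : Int)
      (by rw [PySem.List.mem_pyRange_one]; omega)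
      (by rw [hnzA]; omega)
    rw [hnzA, hgQ] at hcon
    have hle := List.countP_le_length (p := fun j => decide (j ∈ c)) (l := q[k]'hq)
    omega
  have hB : solution_alt n q ans = 0 := by
    simp only [solution_alt]
    rw [PySem.List.foldl_if_add_one, Int.zero_add, Int.natCast_eq_zero, List.countP_eq_zero]
    intro c _
    rw [Bool.not_eq_true]
    rw [checkAllB_eq_all]
    apply List.all_eq_false.mpr
    refine ⟨(q[k]'hq, ans[k]'ha), ?_, ?_⟩
    · have hk : k < (q.zip ans).length := by rw [List.length_zip]; omega
      have := List.getElem_mem hk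
      rwa [List.getElem_zip] at this
    · simp only [Bool.not_eq_true, beq_eq_false_iff_ne, ne_eq]
      have hle := List.countP_le_length (p := fun j => decide (j ∈ c)) (l := q[k]'hq)
      omega
  rw [hA, hB]

-- ===== VERDICT (by name: the statement is the Claim_ definition above) =====
theorem solution_spec : Claim_equal_solution := by
  intro n q ans _ hpre
  cases hpre with
  | inl hlen => exact solution_spec_aux n q ans hlen
  | inr h => exact solution_zero_aux n q ans h.2
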